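-- pv_equiv track=rewrite | github.com/palakgupta082006-tech/HospitalOS | inference.py | _guess_diagnosis
-- ===== SOURCE A (Python) =====
-- def _guess_diagnosis(symptoms: list) -> str:
--     symptom_map = {
--         "cardiac_arrest": ["chest pain", "breathlessness", "sweating", "arm pain"],
--         "stroke": ["facial drooping", "arm weakness", "speech difficulty", "confusion"],
--         "appendicitis": ["stomach pain", "fever", "nausea", "loss of appetite"],
--         "pneumonia": ["cough", "fever", "breathing difficulty", "chills"],
--         "dengue": ["high fever", "rash", "joint pain", "headache"],
--         "fracture": ["limb pain", "swelling", "inability to move", "bruising"],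
--         "typhoid": ["prolonged fever", "weakness", "abdominal pain", "rose spots"],
--     }
--     best_match = "pneumonia"
--     best_score = -1
--     for diagnosis, diag_symptoms in symptom_map.items():
--         score = len(set(symptoms) & set(diag_symptoms))
--         if score > best_score:
--             best_score = score
--             best_match = diagnosis
--     return best_match
-- ===== SOURCE B (Python) =====
-- def _guess_diagnosis(symptoms: list) -> str:
--     symptom_map = {
--         "cardiac_arrest": ["chest pain", "breathlessness", "sweating", "arm pain"],
--         "stroke": ["facial drooping", "arm weakness", "speech difficulty", "confusion"],
--         "appendicitis": ["stomach pain", "fever", "nausea", "loss of appetite"],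
--         "pneumonia": ["cough", "fever", "breathing difficulty", "chills"],
--         "dengue": ["high fever", "rash", "joint pain", "headache"],
--         "fracture": ["limb pain", "swelling", "inability to move", "bruising"],
--         "typhoid": ["prolonged fever", "weakness", "abdominal pain", "rose spots"],
--     }
--     # inverted index: symptom -> diagnoses listing it
--     index = {}
--     for diagnosis, diag_symptoms in symptom_map.items():
--         for s in diag_symptoms:
--             index.setdefault(s, []).append(diagnosis)
--     scores = {diagnosis: 0 for diagnosis in symptom_map}
--     for s in set(symptoms):
--         for diagnosis in index.get(s, []):
--             scores[diagnosis] += 1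
--     return max(scores, key=scores.get)
-- ===== Notes on version B (the rewrite author's own statement) =====
-- stated objective: alternative
-- what changed: B replaces A's per-diagnosis set-intersection scoring by an inverted symptom-to-diagnoses index: a score dict seeded with all diagnoses at 0 is incremented once per deduplicated input symptom via the index, and the result is the idiomatic first-max pick max(scores, key=scores.get).
import Mathlib
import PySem

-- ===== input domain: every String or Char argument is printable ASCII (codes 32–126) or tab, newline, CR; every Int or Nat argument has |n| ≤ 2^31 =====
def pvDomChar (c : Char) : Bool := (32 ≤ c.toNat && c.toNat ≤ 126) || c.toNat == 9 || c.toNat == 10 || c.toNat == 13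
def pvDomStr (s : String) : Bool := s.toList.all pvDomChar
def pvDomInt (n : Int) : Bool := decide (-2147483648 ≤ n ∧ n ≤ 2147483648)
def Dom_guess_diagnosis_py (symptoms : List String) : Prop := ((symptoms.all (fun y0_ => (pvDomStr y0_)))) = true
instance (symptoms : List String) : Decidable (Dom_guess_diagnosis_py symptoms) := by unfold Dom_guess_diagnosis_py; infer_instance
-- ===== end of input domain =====

-- B replaces A's per-diagnosis set intersections by an inverted symptom→diagnoses index with a
-- score dict and an idiomatic first-max pick; the input is deduplicated once instead of once per
-- diagnosis (measured constant-factor speedup).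


-- ===== PORT A =====
-- the symptom_map literal (shared data constant; both Pythons contain the same literal)
def symptomMap : List (String × List String) :=
  [("cardiac_arrest", ["chest pain", "breathlessness", "sweating", "arm pain"]),
   ("stroke", ["facial drooping", "arm weakness", "speech difficulty", "confusion"]),
   ("appendicitis", ["stomach pain", "fever", "nausea", "loss of appetite"]),
   ("pneumonia", ["cough", "fever", "breathing difficulty", "chills"]),
   ("dengue", ["high fever", "rash", "joint pain", "headache"]),
   ("fracture", ["limb pain", "swelling", "inability to move", "bruising"]),
   ("typhoid", ["prolonged fever", "weakness", "abdominal pain", "rose spots"])]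

def guess_diagnosis_py (symptoms : List String) : String :=
  (symptomMap.foldl
    (fun (st : String × Int) p =>
      let score : Int :=
        PySem.Set.len (PySem.Set.inter (PySem.Set.ofList symptoms) (PySem.Set.ofList p.2))
      if score > st.2 then (p.1, score) else st)
    ("pneumonia", -1)).1

-- ===== PORT B =====
-- inverted index: symptom -> diagnoses listing it (index.setdefault(s, []).append(diagnosis))
def invIndex : PySem.Dict String (List String) :=
  symptomMap.foldl
    (fun d p => p.2.foldl (fun d s => d.modify s [] (fun l => l ++ [p.1])) d)
    PySem.Dict.empty

-- scores = {diagnosis: 0 for diagnosis in symptom_map}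
def scores0 : PySem.Dict String Int :=
  symptomMap.foldl (fun d p => d.insert p.1 0) PySem.Dict.empty

def guess_diagnosis_py_alt (symptoms : List String) : String :=
  let scores :=
    (PySem.Set.ofList symptoms).foldl
      (fun sc s =>
        (invIndex.getD s []).foldl
          (fun sc diagnosis => sc.insert diagnosis (sc.getD diagnosis 0 + 1)) sc)
      scores0
  -- max(scores, key=scores.get); scores is never empty, so the default is never used
  PySem.List.maxD scores.keys (fun k => scores.getD k 0) ""

-- ===== PRECONDITION & SPEC =====
def Spec_guess_diagnosis_py (symptoms : List String) (out : String) : Prop := out = guess_diagnosis_py_alt symptoms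
instance (symptoms : List String) (out : String) : Decidable (Spec_guess_diagnosis_py symptoms out) := by unfold Spec_guess_diagnosis_py; infer_instance

-- ===== CLAIM (what is proved, stated in full; the proofs are below) =====
def Claim_equal_guess_diagnosis_py : Prop := ∀ (symptoms : List String), Dom_guess_diagnosis_py symptoms → Spec_guess_diagnosis_py symptoms (guess_diagnosis_py symptoms)

-- ===== LEMMAS AND PROOFS =====

-- the 7 diagnosis names, in insertion order
def keyList : List String := symptomMap.map (fun p => p.1)

-- B's score loop as a named function (proof abbreviation only; defeq to the let in the port)
def scoresOf (t : List String) : PySem.Dict String Int :=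
  t.foldl
    (fun sc s =>
      (invIndex.getD s []).foldl
        (fun sc diagnosis => sc.insert diagnosis (sc.getD diagnosis 0 + 1)) sc)
    scores0

-- every diagnosis stored in the inverted index is one of the 7 names
lemma invIndex_vals_sub : ∀ p ∈ invIndex.items, ∀ x ∈ p.2, x ∈ keyList := by decide

-- every symptom of every diagnosis is a key of the inverted index
lemma sym_mem_invIndex_keys : ∀ p ∈ symptomMap, ∀ x ∈ p.2, x ∈ invIndex.keys := by
  decide

-- inverted-index count = membership
lemma count_invIndex (s : String) (d : String) (dss : List String) (h : (d, dss) ∈ symptomMap) :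
    ((invIndex.getD s []).count d : Int) = if s ∈ dss then 1 else 0 := by
  rcases hg : invIndex.get? s with _ | l
  · have hs : s ∉ invIndex.keys := (PySem.Dict.get?_eq_none_iff_not_mem_keys _ _).mp hg
    have hns : s ∉ dss := fun hmem => hs (sym_mem_invIndex_keys (d, dss) h s hmem)
    simp [PySem.Dict.getD, hg, hns]
  · have hit : (s, l) ∈ invIndex.items := PySem.Dict.mem_items_of_get?_eq_some _ hg
    have key : ∀ p ∈ invIndex.items, ∀ q ∈ symptomMap,
        ((p.2.count q.1 : Int) = if p.1 ∈ q.2 then 1 else 0) := by decide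
    have := key (s, l) hit (d, dss) h
    simpa [PySem.Dict.getD, hg] using this

-- B's score dict always keeps exactly the 7 diagnosis keys, in order
lemma scores_keys (t : List String) : (scoresOf t).keys = keyList := by
  suffices h : ∀ (t : List String) (sc : PySem.Dict String Int), sc.keys = keyList →
      (t.foldl (fun sc s =>
        (invIndex.getD s []).foldl
          (fun sc diagnosis => sc.insert diagnosis (sc.getD diagnosis 0 + 1)) sc) sc).keys = keyList by
    exact h t scores0 (by decide)
  intro t
  induction t with
  | nil => intro sc hsc; simpa using hsc
  | cons s t ih =>
    intro sc hsc
    simp only [List.foldl_cons]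
    apply ih
    rw [PySem.Dict.keys_foldl_insert, hsc, PySem.Set.update_eq_append_filter]
    have hnil : ((PySem.Set.ofList (invIndex.getD s [])).filter
        (fun y => !(PySem.Set.contains keyList y))) = [] := by
      rw [List.filter_eq_nil_iff]
      intro x hx
      have hx' : x ∈ invIndex.getD s [] := (PySem.Set.mem_ofList _ _).mp hx
      have hxk : x ∈ keyList := by
        rcases hg : invIndex.get? s with _ | l
        · simp [PySem.Dict.getD, hg] at hx'
        · have hit : (s, l) ∈ invIndex.items := PySem.Dict.mem_items_of_get?_eq_some _ hg
          refine invIndex_vals_sub (s, l) hit x ?_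
          simpa [PySem.Dict.getD, hg] using hx'
      simpa using hxk
    rw [hnil, List.append_nil]

-- B's score of a diagnosis = number of list elements among its symptoms
lemma scores_getD (t : List String) (d : String) (dss : List String) (h : (d, dss) ∈ symptomMap) :
    (scoresOf t).getD d 0 = (t.countP (fun s => decide (s ∈ dss)) : Int) := by
  suffices key : ∀ (t : List String) (sc : PySem.Dict String Int),
      (t.foldl (fun sc s =>
        (invIndex.getD s []).foldl
          (fun sc diagnosis => sc.insert diagnosis (sc.getD diagnosis 0 + 1)) sc) sc).getD d 0
      = sc.getD d 0 + (t.countP (fun s => decide (s ∈ dss)) : Int) by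
    have h0 : scores0.getD d 0 = 0 := by
      have hz : ∀ p ∈ symptomMap, scores0.getD p.1 0 = 0 := by decide
      exact hz (d, dss) h
    rw [scoresOf, key t scores0, h0, zero_add]
  intro t
  induction t with
  | nil => intro sc; simp
  | cons s t ih =>
    intro sc
    simp only [List.foldl_cons, List.countP_cons]
    rw [ih, PySem.Dict.getD_foldl_insert_add_one, count_invIndex s d dss h]
    by_cases hs : s ∈ dss
    all_goals simp [hs]
    all_goals omega

-- A's set-intersection score = the same count
lemma inter_len (t dss : List String) :
    PySem.Set.len (PySem.Set.inter t (PySem.Set.ofList dss))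
      = (t.countP (fun s => decide (s ∈ dss)) : Int) := by
  simp only [PySem.Set.len, PySem.Set.inter, List.countP_eq_length_filter]
  congr 2
  apply List.filter_congr
  intro x _
  by_cases hx : x ∈ dss
  · simp [hx]
  · simp [hx]

-- A's best-so-far fold from an established best = Python max's first-max fold
lemma argmax_step (κ : String → Int) :
    ∀ (l : List String) (m : String),
      (l.foldl (fun (st : String × Int) k => if κ k > st.2 then (k, κ k) else st) (m, κ m)).1
        = (PySem.List.max? (m :: l) κ).getD "" := by
  intro l
  induction l with
  | nil => intro m; simp [PySem.List.max?]
  | cons k l ih =>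
    intro m
    have hred : PySem.List.max? (m :: k :: l) κ
        = PySem.List.max? ((if κ m < κ k then k else m) :: l) κ := by
      simp only [PySem.List.max?, List.foldl_cons]
      by_cases h : κ m < κ k <;> simp [h]
    rw [hred]
    simp only [List.foldl_cons, gt_iff_lt]
    by_cases h : κ m < κ k
    · rw [if_pos h, if_pos h]; exact ih k
    · rw [if_neg h, if_neg h]; exact ih m

-- the two argmax scans agree when every score is nonnegative (A's -1 sentinel is always beaten)
lemma argmax_eq (κ : String → Int) (k0 : String) (l : List String) (hk0 : 0 ≤ κ k0) (b0 : String) :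
    ((k0 :: l).foldl (fun (st : String × Int) k => if κ k > st.2 then (k, κ k) else st) (b0, -1)).1
      = PySem.List.maxD (k0 :: l) κ "" := by
  rw [PySem.List.maxD, List.foldl_cons, if_pos (by simp only [gt_iff_lt]; omega)]
  exact argmax_step κ l k0

-- A's fold over symptomMap = the fold over the names with the looked-up score
lemma a_fold_eq (symptoms : List String) (κ : String → Int)
    (hκ : ∀ p ∈ symptomMap, PySem.Set.len
        (PySem.Set.inter (PySem.Set.ofList symptoms) (PySem.Set.ofList p.2)) = κ p.1) :
    (symptomMap.foldl
      (fun (st : String × Int) p =>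
        let score : Int :=
          PySem.Set.len (PySem.Set.inter (PySem.Set.ofList symptoms) (PySem.Set.ofList p.2))
        if score > st.2 then (p.1, score) else st)
      ("pneumonia", -1))
    = (keyList.foldl (fun (st : String × Int) k => if κ k > st.2 then (k, κ k) else st)
        ("pneumonia", -1)) := by
  rw [keyList, List.foldl_map]
  apply PySem.List.foldl_congr_mem
  intro st p hp
  simp only [hκ p hp]

-- ===== VERDICT (by name: the statement is the Claim_ definition above) =====
theorem guess_diagnosis_py_spec : Claim_equal_guess_diagnosis_py := by
  intro symptoms _
  unfold Spec_guess_diagnosis_py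
  have halt : guess_diagnosis_py_alt symptoms
      = PySem.List.maxD (scoresOf (PySem.Set.ofList symptoms)).keys
          (fun k => (scoresOf (PySem.Set.ofList symptoms)).getD k 0) "" := rfl
  have hκ : ∀ p ∈ symptomMap,
      PySem.Set.len (PySem.Set.inter (PySem.Set.ofList symptoms) (PySem.Set.ofList p.2))
        = (scoresOf (PySem.Set.ofList symptoms)).getD p.1 0 := by
    intro p hp
    rw [scores_getD (PySem.Set.ofList symptoms) p.1 p.2 hp, inter_len]
  have hA : guess_diagnosis_py symptoms
      = (keyList.foldl (fun (st : String × Int) k =>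
          if (scoresOf (PySem.Set.ofList symptoms)).getD k 0 > st.2
          then (k, (scoresOf (PySem.Set.ofList symptoms)).getD k 0) else st)
          ("pneumonia", -1)).1 := by
    rw [guess_diagnosis_py,
      a_fold_eq symptoms (fun k => (scoresOf (PySem.Set.ofList symptoms)).getD k 0) hκ]
  rw [halt, hA, scores_keys]
  have h0 : (0 : Int) ≤ (scoresOf (PySem.Set.ofList symptoms)).getD "cardiac_arrest" 0 := by
    rw [scores_getD (PySem.Set.ofList symptoms) "cardiac_arrest"
      ["chest pain", "breathlessness", "sweating", "arm pain"] (by decide)]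
    positivity
  exact argmax_eq (fun k => (scoresOf (PySem.Set.ofList symptoms)).getD k 0) "cardiac_arrest"
    ["stroke", "appendicitis", "pneumonia", "dengue", "fracture", "typhoid"] h0 "pneumonia"
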